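-- pv_equiv track=rewrite | github.com/giftchaps/Decepticloud | src/deception/content_generator.py | generate_find_results
-- ===== SOURCE A (Python) =====
-- from typing import Dict, List, Optional, Tuple
--
-- def generate_find_results(search_term: str, interests: List[str],
--                          skill_level: str) -> List[str]:
--     """
--     Generate fake find command results.
--
--     Args:
--         search_term: What the attacker is searching for
--         interests: Attacker interests
--         skill_level: Attacker skill level
--
--     Returns:
--         List of fake file paths
--     """
--     results = []
--
--     # Credential-related searches
--     if any(x in search_term.lower() for x in ['password', 'passwd', 'pwd', 'pass']):
--         results.extend([
--             '/home/ubuntu/.ssh/id_rsa',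
--             '/var/backups/.mysql_passwords',
--             '/opt/app/config/database_passwords.txt',
--             '/home/deploy/.password-store',
--         ])
--
--     if 'ssh' in search_term.lower() or 'id_rsa' in search_term.lower():
--         results.extend([
--             '/home/ubuntu/.ssh/id_rsa',
--             '/home/admin/.ssh/id_rsa',
--             '/root/.ssh/id_rsa',
--             '/home/deploy/.ssh/authorized_keys',
--         ])
--
--     if '.env' in search_term.lower() or 'env' in search_term.lower():
--         results.extend([
--             '/var/www/app/.env',
--             '/opt/application/.env.production',
--             '/home/ubuntu/projects/api/.env.backup',
--             '/var/backups/.env.old',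
--         ])
--
--     if 'aws' in search_term.lower() or 'credentials' in search_term.lower():
--         results.extend([
--             '/home/ubuntu/.aws/credentials',
--             '/root/.aws/credentials',
--             '/home/jenkins/.aws/config',
--         ])
--
--     # Financial searches
--     if any(x in search_term.lower() for x in ['payment', 'payroll', 'invoice', 'bank']):
--         results.extend([
--             '/var/data/payroll/november_2024.csv',
--             '/home/finance/invoices_q4.xlsx',
--             '/opt/billing/payment_records.db',
--         ])
--
--     # Database searches
--     if any(x in search_term.lower() for x in ['database', '.db', 'sql', 'mysql', 'postgres']):
--         results.extend([
--             '/var/lib/mysql/production.sql',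
--             '/var/backups/database_dump.sql',
--             '/opt/app/data/users.db',
--         ])
--
--     # Config searches
--     if any(x in search_term.lower() for x in ['config', 'conf', '.cfg']):
--         results.extend([
--             '/etc/nginx/nginx.conf',
--             '/opt/app/config/production.cfg',
--             '/var/www/app/config/database.yml',
--         ])
--
--     # Backup searches
--     if 'backup' in search_term.lower() or '.bak' in search_term.lower():
--         results.extend([
--             '/var/backups/system_backup.tar.gz',
--             '/home/ubuntu/backup_credentials.txt',
--             '/opt/backups/database_2024-11-27.sql',
--         ])
--
--     # Limit results based on skill level
--     if skill_level == 'novice':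
--         return results[:3]
--     elif skill_level == 'intermediate':
--         return results[:5]
--     else:
--         return results
-- ===== SOURCE B (Python) =====
-- # Different algorithm: instead of testing each keyword group with `in` on the term,
-- # B does one left-to-right scan over the lowered term, marking which rule groups
-- # have a pattern starting at each position (multi-pattern matching), then emits
-- # the fired groups' paths in group order and truncates by skill level.
--
-- _PATHS = [
--     ['/home/ubuntu/.ssh/id_rsa',
--      '/var/backups/.mysql_passwords',
--      '/opt/app/config/database_passwords.txt',
--      '/home/deploy/.password-store'],
--     ['/home/ubuntu/.ssh/id_rsa',
--      '/home/admin/.ssh/id_rsa',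
--      '/root/.ssh/id_rsa',
--      '/home/deploy/.ssh/authorized_keys'],
--     ['/var/www/app/.env',
--      '/opt/application/.env.production',
--      '/home/ubuntu/projects/api/.env.backup',
--      '/var/backups/.env.old'],
--     ['/home/ubuntu/.aws/credentials',
--      '/root/.aws/credentials',
--      '/home/jenkins/.aws/config'],
--     ['/var/data/payroll/november_2024.csv',
--      '/home/finance/invoices_q4.xlsx',
--      '/opt/billing/payment_records.db'],
--     ['/var/lib/mysql/production.sql',
--      '/var/backups/database_dump.sql',
--      '/opt/app/data/users.db'],
--     ['/etc/nginx/nginx.conf',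
--      '/opt/app/config/production.cfg',
--      '/var/www/app/config/database.yml'],
--     ['/var/backups/system_backup.tar.gz',
--      '/home/ubuntu/backup_credentials.txt',
--      '/opt/backups/database_2024-11-27.sql'],
-- ]
--
-- _PATTERNS = [
--     ('password', 0), ('passwd', 0), ('pwd', 0), ('pass', 0),
--     ('ssh', 1), ('id_rsa', 1),
--     ('.env', 2), ('env', 2),
--     ('aws', 3), ('credentials', 3),
--     ('payment', 4), ('payroll', 4), ('invoice', 4), ('bank', 4),
--     ('database', 5), ('.db', 5), ('sql', 5), ('mysql', 5), ('postgres', 5),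
--     ('config', 6), ('conf', 6), ('.cfg', 6),
--     ('backup', 7), ('.bak', 7),
-- ]
--
--
-- def generate_find_results(search_term, interests, skill_level):
--     term = search_term.lower()
--     fired = set()
--     for pos in range(len(term)):
--         for pat, idx in _PATTERNS:
--             if idx not in fired and term.startswith(pat, pos):
--                 fired.add(idx)
--     results = [p for i, paths in enumerate(_PATHS) if i in fired for p in paths]
--     if skill_level == 'novice':
--         return results[:3]
--     if skill_level == 'intermediate':
--         return results[:5]
--     return results
-- ===== Notes on version B (the rewrite author's own statement) =====
-- stated objective: alternative
-- what changed: Instead of testing each keyword group with a substring-containment check, B lowercases the term once and does a single left-to-right scan over its positions, marking in a set which rule groups have a pattern starting at each position (multi-pattern matching), then emits the fired groups' path lists in group order and truncates by skill level.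
import Mathlib
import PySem

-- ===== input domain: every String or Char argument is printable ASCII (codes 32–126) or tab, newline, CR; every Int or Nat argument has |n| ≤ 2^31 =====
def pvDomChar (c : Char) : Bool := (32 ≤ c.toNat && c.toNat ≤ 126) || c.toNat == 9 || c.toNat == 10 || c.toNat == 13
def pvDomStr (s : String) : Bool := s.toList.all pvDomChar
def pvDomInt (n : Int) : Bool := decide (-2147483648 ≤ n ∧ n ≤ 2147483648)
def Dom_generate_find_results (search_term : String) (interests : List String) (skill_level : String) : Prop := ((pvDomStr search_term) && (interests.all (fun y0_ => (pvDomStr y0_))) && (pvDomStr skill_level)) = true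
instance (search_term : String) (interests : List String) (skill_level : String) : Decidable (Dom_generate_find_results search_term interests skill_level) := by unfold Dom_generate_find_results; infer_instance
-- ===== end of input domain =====

-- B replaces A's per-keyword substring tests by a single left-to-right scan over the lowered term that marks which rule groups have a pattern starting at each position (objective: alternative); same values on all inputs.


-- ===== PORT A =====
-- Port of A: eight sequential if/extend blocks (each re-lowering the term, as A does), then the skill-level slice.
def generate_find_results (search_term : String) (interests : List String) (skill_level : String) : List String :=
  let results : List String := []
  let results := if ["password","passwd","pwd","pass"].any (fun x => PySem.Str.isIn x (PySem.Str.lower search_term)) then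
      results ++ ["/home/ubuntu/.ssh/id_rsa", "/var/backups/.mysql_passwords", "/opt/app/config/database_passwords.txt", "/home/deploy/.password-store"]
    else results
  let results := if PySem.Str.isIn "ssh" (PySem.Str.lower search_term) || PySem.Str.isIn "id_rsa" (PySem.Str.lower search_term) then
      results ++ ["/home/ubuntu/.ssh/id_rsa", "/home/admin/.ssh/id_rsa", "/root/.ssh/id_rsa", "/home/deploy/.ssh/authorized_keys"]
    else results
  let results := if PySem.Str.isIn ".env" (PySem.Str.lower search_term) || PySem.Str.isIn "env" (PySem.Str.lower search_term) then
      results ++ ["/var/www/app/.env", "/opt/application/.env.production", "/home/ubuntu/projects/api/.env.backup", "/var/backups/.env.old"]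
    else results
  let results := if PySem.Str.isIn "aws" (PySem.Str.lower search_term) || PySem.Str.isIn "credentials" (PySem.Str.lower search_term) then
      results ++ ["/home/ubuntu/.aws/credentials", "/root/.aws/credentials", "/home/jenkins/.aws/config"]
    else results
  let results := if ["payment","payroll","invoice","bank"].any (fun x => PySem.Str.isIn x (PySem.Str.lower search_term)) then
      results ++ ["/var/data/payroll/november_2024.csv", "/home/finance/invoices_q4.xlsx", "/opt/billing/payment_records.db"]
    else results
  let results := if ["database",".db","sql","mysql","postgres"].any (fun x => PySem.Str.isIn x (PySem.Str.lower search_term)) then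
      results ++ ["/var/lib/mysql/production.sql", "/var/backups/database_dump.sql", "/opt/app/data/users.db"]
    else results
  let results := if ["config","conf",".cfg"].any (fun x => PySem.Str.isIn x (PySem.Str.lower search_term)) then
      results ++ ["/etc/nginx/nginx.conf", "/opt/app/config/production.cfg", "/var/www/app/config/database.yml"]
    else results
  let results := if PySem.Str.isIn "backup" (PySem.Str.lower search_term) || PySem.Str.isIn ".bak" (PySem.Str.lower search_term) then
      results ++ ["/var/backups/system_backup.tar.gz", "/home/ubuntu/backup_credentials.txt", "/opt/backups/database_2024-11-27.sql"]
    else results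
  if skill_level == "novice" then PySem.List.slice results none (some 3)
  else if skill_level == "intermediate" then PySem.List.slice results none (some 5)
  else results

-- ===== PORT B =====
-- Port of B: the path lists per rule group, and the flat (pattern, group-index) table.
def gfrPaths : List (List String) :=
  [ ["/home/ubuntu/.ssh/id_rsa", "/var/backups/.mysql_passwords", "/opt/app/config/database_passwords.txt", "/home/deploy/.password-store"],
    ["/home/ubuntu/.ssh/id_rsa", "/home/admin/.ssh/id_rsa", "/root/.ssh/id_rsa", "/home/deploy/.ssh/authorized_keys"],
    ["/var/www/app/.env", "/opt/application/.env.production", "/home/ubuntu/projects/api/.env.backup", "/var/backups/.env.old"],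
    ["/home/ubuntu/.aws/credentials", "/root/.aws/credentials", "/home/jenkins/.aws/config"],
    ["/var/data/payroll/november_2024.csv", "/home/finance/invoices_q4.xlsx", "/opt/billing/payment_records.db"],
    ["/var/lib/mysql/production.sql", "/var/backups/database_dump.sql", "/opt/app/data/users.db"],
    ["/etc/nginx/nginx.conf", "/opt/app/config/production.cfg", "/var/www/app/config/database.yml"],
    ["/var/backups/system_backup.tar.gz", "/home/ubuntu/backup_credentials.txt", "/opt/backups/database_2024-11-27.sql"] ]

def gfrPatterns : List (List Char × Int) :=
  [ ("password".toList, 0), ("passwd".toList, 0), ("pwd".toList, 0), ("pass".toList, 0),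
    ("ssh".toList, 1), ("id_rsa".toList, 1),
    (".env".toList, 2), ("env".toList, 2),
    ("aws".toList, 3), ("credentials".toList, 3),
    ("payment".toList, 4), ("payroll".toList, 4), ("invoice".toList, 4), ("bank".toList, 4),
    ("database".toList, 5), (".db".toList, 5), ("sql".toList, 5), ("mysql".toList, 5), ("postgres".toList, 5),
    ("config".toList, 6), ("conf".toList, 6), (".cfg".toList, 6),
    ("backup".toList, 7), (".bak".toList, 7) ]

-- inner loop body: one position pos of the scan; term.startswith(pat, pos) is exact as
-- Chars.startswith on term.drop pos since 0 ≤ pos < len(term) here.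
def gfrScanStep (term : List Char) (fired : PySem.Set Int) (pos : Nat) : PySem.Set Int :=
  gfrPatterns.foldl
    (fun f pr =>
      if !(PySem.Set.contains f pr.2) && PySem.Chars.startswith (term.drop pos) pr.1
      then PySem.Set.add f pr.2 else f) fired

-- Port of B: lower once, scan every position of the term (range(len(term)) — indices are
-- the naturals 0..len-1, ported as List.range), then emit the fired groups' paths in order.
def generate_find_results_alt (search_term : String) (interests : List String) (skill_level : String) : List String :=
  let term := PySem.Chars.lower search_term.toList
  let fired := (List.range term.length).foldl (gfrScanStep term) PySem.Set.empty
  let results := (PySem.List.enumerate gfrPaths).flatMap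
    (fun ip => if PySem.Set.contains fired ip.1 then ip.2 else [])
  if skill_level == "novice" then PySem.List.slice results none (some 3)
  else if skill_level == "intermediate" then PySem.List.slice results none (some 5)
  else results

-- ===== PRECONDITION & SPEC =====
def Spec_generate_find_results (search_term : String) (interests : List String) (skill_level : String) (out : List String) : Prop := out = generate_find_results_alt search_term interests skill_level
instance (search_term : String) (interests : List String) (skill_level : String) (out : List String) : Decidable (Spec_generate_find_results search_term interests skill_level out) := by unfold Spec_generate_find_results; infer_instance

-- ===== CLAIM (what is proved, stated in full; the proofs are below) =====
def Claim_equal_generate_find_results : Prop := ∀ (search_term : String) (interests : List String) (skill_level : String), Dom_generate_find_results search_term interests skill_level → Spec_generate_find_results search_term interests skill_level (generate_find_results search_term interests skill_level)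

-- ===== LEMMAS AND PROOFS =====

-- Membership after the inner pattern loop of one scan position.
theorem mem_gfr_inner (s : List Char) (ps : List (List Char × Int)) (f : PySem.Set Int) (i : Int) :
    i ∈ ps.foldl
      (fun f pr =>
        if !(PySem.Set.contains f pr.2) && PySem.Chars.startswith s pr.1
        then PySem.Set.add f pr.2 else f) f
    ↔ i ∈ f ∨ ∃ pr ∈ ps, pr.2 = i ∧ PySem.Chars.startswith s pr.1 = true := by
  induction ps generalizing f with
  | nil => simp
  | cons pr ps ih =>
    simp only [List.foldl_cons]
    rw [ih]
    have hstep : i ∈ (if !(PySem.Set.contains f pr.2) && PySem.Chars.startswith s pr.1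
        then PySem.Set.add f pr.2 else f) ↔
        i ∈ f ∨ (pr.2 = i ∧ PySem.Chars.startswith s pr.1 = true) := by
      by_cases hc : PySem.Set.contains f pr.2 = true
      · rw [if_neg (by intro h; rw [hc] at h; simp at h)]
        have hm : pr.2 ∈ f := (PySem.Set.contains_iff f pr.2).1 hc
        constructor
        · exact Or.inl
        · rintro (h | ⟨rfl, _⟩)
          · exact h
          · exact hm
      · have hc' : PySem.Set.contains f pr.2 = false := by
          rwa [Bool.not_eq_true] at hc
        by_cases hs : PySem.Chars.startswith s pr.1 = true
        · rw [if_pos (by rw [hc', hs]; rfl), PySem.Set.mem_add]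
          constructor
          · rintro (h | rfl)
            · exact Or.inl h
            · exact Or.inr ⟨rfl, hs⟩
          · rintro (h | ⟨rfl, _⟩)
            · exact Or.inl h
            · exact Or.inr rfl
        · have hs' : PySem.Chars.startswith s pr.1 = false := by
            rwa [Bool.not_eq_true] at hs
          rw [if_neg (by rw [hs']; simp)]
          constructor
          · exact Or.inl
          · rintro (h | ⟨rfl, h2⟩)
            · exact h
            · exact absurd h2 hs
    rw [hstep]
    simp only [List.mem_cons, exists_eq_or_imp]
    tauto

-- Membership after scanning the first n positions.
theorem mem_gfr_scan (term : List Char) (n : Nat) (i : Int) :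
    i ∈ (List.range n).foldl (gfrScanStep term) PySem.Set.empty
    ↔ ∃ pos < n, ∃ pr ∈ gfrPatterns, pr.2 = i ∧
        PySem.Chars.startswith (term.drop pos) pr.1 = true := by
  induction n with
  | zero => simp [PySem.Set.empty]
  | succ n ih =>
    rw [List.range_succ, List.foldl_append]
    simp only [List.foldl_cons, List.foldl_nil, gfrScanStep, mem_gfr_inner, ih]
    constructor
    · rintro (⟨pos, h1, h2⟩ | ⟨pr, hq, h2, h3⟩)
      · exact ⟨pos, Nat.lt_succ_of_lt h1, h2⟩
      · exact ⟨n, Nat.lt_succ_self n, pr, hq, h2, h3⟩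
    · rintro ⟨pos, h1, h2⟩
      rcases Nat.lt_succ_iff_lt_or_eq.1 h1 with h | rfl
      · exact Or.inl ⟨pos, h, h2⟩
      · exact Or.inr h2

-- A nonempty pattern starts at some scanned position iff it is a substring.
theorem exists_pos_iff_isIn (term pat : List Char) (h : pat ≠ []) :
    (∃ pos, pos < term.length ∧ PySem.Chars.startswith (term.drop pos) pat = true)
    ↔ PySem.Chars.isIn pat term = true := by
  rw [← PySem.Chars.exists_prefix_drop_iff_isIn]
  constructor
  · rintro ⟨pos, _, h2⟩
    exact ⟨pos, (PySem.Chars.startswith_iff _ _).1 h2⟩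
  · rintro ⟨pos, h2⟩
    by_cases hl : pos < term.length
    · exact ⟨pos, hl, (PySem.Chars.startswith_iff _ _).2 h2⟩
    · exfalso
      rw [List.drop_eq_nil_of_le (Nat.le_of_not_lt hl)] at h2
      exact h (List.prefix_nil.1 h2)

-- The scan's fired set, characterised per rule index as "some pattern of that rule is a substring".
theorem contains_fired (term : List Char) (i : Int) :
    PySem.Set.contains ((List.range term.length).foldl (gfrScanStep term) PySem.Set.empty) i
    = gfrPatterns.any (fun pr => pr.2 == i && PySem.Chars.isIn pr.1 term) := by
  have hne : ∀ pr ∈ gfrPatterns, pr.1 ≠ [] := by decide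
  rw [Bool.eq_iff_iff, PySem.Set.contains_iff, mem_gfr_scan, List.any_eq_true]
  constructor
  · rintro ⟨pos, h1, pr, hmem, rfl, h3⟩
    refine ⟨pr, hmem, ?_⟩
    simp only [beq_self_eq_true, Bool.true_and]
    exact (exists_pos_iff_isIn term pr.1 (hne pr hmem)).1 ⟨pos, h1, h3⟩
  · rintro ⟨pr, hmem, h⟩
    rw [Bool.and_eq_true] at h
    obtain ⟨h1, h2⟩ := h
    obtain ⟨pos, hl, hsw⟩ := (exists_pos_iff_isIn term pr.1 (hne pr hmem)).2 h2
    exact ⟨pos, hl, pr, hmem, eq_of_beq h1, hsw⟩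

-- A's "extend inside the if" written as an append of an if.
theorem ite_extend (c : Prop) [Decidable c] (acc L : List String) :
    (if c then acc ++ L else acc) = acc ++ (if c then L else []) := by
  split_ifs <;> simp

-- ===== VERDICT (by name: the statement is the Claim_ definition above) =====
theorem generate_find_results_spec : Claim_equal_generate_find_results := by
  intro search_term interests skill_level _
  unfold Spec_generate_find_results generate_find_results generate_find_results_alt
  simp only [contains_fired, gfrPaths, gfrPatterns, PySem.List.enumerate_cons,
    PySem.List.enumerate_nil, List.flatMap_cons, List.flatMap_nil, List.any_cons, List.any_nil,
    PySem.Str.isIn_eq, PySem.Str.toList_lower, ite_extend, List.nil_append, List.append_nil,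
    Bool.or_false, beq_iff_eq]
  norm_num
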